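-- pv_equiv track=rewrite | github.com/deyh2020/Electron-electron_GF_Feynman_Diagrams | generator.py | genny
-- ===== SOURCE A (Python) =====
-- def genny(n):
--     G=(2*n)+1
--     One=[]
--     c=0
--     while n>=c:
--         g=str(c)+str(c)
--         One.append(str(g))
--         f=str(c)+'p'
--         One.append(str(f))
--         c=c+1
--     One.remove('0p')
--     One.remove('00')
--     chunkii=[]
--     for x in range(0, len(One), 2):
--         chunkii.append(One[x:x+2])
--     return chunkii
-- ===== SOURCE B (Python) =====
-- def genny(n):
--     return [[str(c) + str(c), str(c) + 'p'] for c in range(1, n + 1)]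
-- ===== Notes on version B (the rewrite author's own statement) =====
-- stated objective: simpler
-- what changed: B generates the pairs for c = 1..n directly with one comprehension, eliminating A's flat append loop starting at c = 0, the two list.remove calls that delete the c = 0 entries, and the separate slicing pass that re-chunks the flat list into pairs.
import Mathlib
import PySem

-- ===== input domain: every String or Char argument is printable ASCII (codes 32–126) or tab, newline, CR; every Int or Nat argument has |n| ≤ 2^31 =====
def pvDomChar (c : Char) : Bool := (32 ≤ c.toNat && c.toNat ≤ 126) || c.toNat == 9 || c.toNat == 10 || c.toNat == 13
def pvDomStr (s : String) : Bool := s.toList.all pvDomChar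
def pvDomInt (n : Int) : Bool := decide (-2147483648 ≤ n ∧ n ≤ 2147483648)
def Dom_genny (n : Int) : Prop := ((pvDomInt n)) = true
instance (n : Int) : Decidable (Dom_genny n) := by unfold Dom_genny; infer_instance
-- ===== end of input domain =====

-- B builds the pairs for c = 1..n directly with one comprehension, dropping A's flat
-- append loop from c = 0, the two list.remove calls and the separate re-chunking pass (objective: simpler).

-- ===== PORT A =====
-- the 'while n >= c' loop, appending str(c)+str(c) then str(c)+'p' to One each iteration
def gennyLoop (n c : Int) (one : List String) : List String :=
  if _h : n ≥ c then
    gennyLoop n (c + 1) ((one ++ [PySem.Int.toStr c ++ PySem.Int.toStr c]) ++ [PySem.Int.toStr c ++ "p"])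
  else one
termination_by (n + 1 - c).toNat
decreasing_by omega

def genny (n : Int) : List (List String) :=
  let _G := (2 * n) + 1
  let one := gennyLoop n 0 []
  -- One.remove('0p'); One.remove('00'): Python raises ValueError when absent (excluded by Pre_)
  match PySem.List.remove? one "0p" with
  | none => []
  | some one1 =>
    match PySem.List.remove? one1 "00" with
    | none => []
    | some one2 =>
      (PySem.List.pyRange 0 (PySem.List.len one2) 2).foldl
        (fun acc x => acc ++ [PySem.List.slice one2 (some x) (some (x + 2))]) []

-- ===== PORT B =====
def genny_alt (n : Int) : List (List String) :=
  (PySem.List.pyRange 1 (n + 1) 1).map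
    (fun c => [PySem.Int.toStr c ++ PySem.Int.toStr c, PySem.Int.toStr c ++ "p"])

-- ===== PRECONDITION & SPEC =====
-- Pre_ excludes n < 0, where A's One.remove('0p') raises ValueError (the loop body never ran).
def Pre_genny (n : Int) : Prop := 0 ≤ n
instance (n : Int) : Decidable (Pre_genny n) := by unfold Pre_genny; infer_instance
def pvWitness_genny : Int := (3)

def Spec_genny (n : Int) (out : List (List String)) : Prop := out = genny_alt n
instance (n : Int) (out : List (List String)) : Decidable (Spec_genny n out) := by unfold Spec_genny; infer_instance

-- ===== CLAIM (what is proved, stated in full; the proofs are below) =====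
def Claim_equal_genny : Prop := ∀ (n : Int), Dom_genny n → Pre_genny n → Spec_genny n (genny n)

-- ===== LEMMAS AND PROOFS =====

-- the pair of strings produced for counter value c
def pvPair (c : Int) : List String :=
  [PySem.Int.toStr c ++ PySem.Int.toStr c, PySem.Int.toStr c ++ "p"]

lemma gennyLoop_eq (n c : Int) (one : List String) :
    gennyLoop n c one = one ++ ((PySem.List.pyRange c (n + 1) 1).map pvPair).flatten := by
  fun_induction gennyLoop n c one with
  | case1 c one h ih =>
      rw [ih, PySem.List.pyRange_one_cons (by omega : c < n + 1)]
      simp [pvPair]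
  | case2 c one h =>
      rw [PySem.List.pyRange_one_eq_nil (by omega : n + 1 ≤ c)]
      simp

lemma map_slice_flatten (ps : List (List String)) (h : ∀ p ∈ ps, p.length = 2) :
    (List.range ps.length).map
      (fun (k : Nat) => PySem.List.slice ps.flatten (some (0 + 2 * (k : Int))) (some (0 + 2 * (k : Int) + 2)))
      = ps := by
  induction ps with
  | nil => simp
  | cons p rest ih =>
      rw [List.length_cons, List.range_succ_eq_map, List.map_cons]
      have hp := h p List.mem_cons_self
      have hflat : (p :: rest).flatten = p ++ rest.flatten := by simp
      have h0 : PySem.List.slice (p :: rest).flatten (some (0 + 2 * ((0 : Nat) : Int)))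
          (some (0 + 2 * ((0 : Nat) : Int) + 2)) = p := by
        have e2 : (0 : Int) + 2 * ((0 : Nat) : Int) + 2 = ((2 : Nat) : Int) := by norm_num
        have e0 : (0 : Int) + 2 * ((0 : Nat) : Int) = ((0 : Nat) : Int) := by norm_num
        rw [e2, e0, PySem.List.slice_natCast]
        obtain ⟨a, b, rfl⟩ := List.length_eq_two.mp hp
        simp [hflat]
      rw [h0]
      congr 1
      rw [List.map_map]
      have step : ∀ k ∈ List.range rest.length,
          ((fun (k : Nat) => PySem.List.slice (p :: rest).flatten (some (0 + 2 * (k : Int)))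
              (some (0 + 2 * (k : Int) + 2))) ∘ Nat.succ) k
          = PySem.List.slice rest.flatten (some (0 + 2 * (k : Int))) (some (0 + 2 * (k : Int) + 2)) := by
        intro k _
        simp only [Function.comp_apply, Nat.succ_eq_add_one]
        have e2 : (0 : Int) + 2 * (((k + 1 : Nat)) : Int) + 2 = (((2 + 2 * k + 2 : Nat)) : Int) := by push_cast; ring
        have e1 : (0 : Int) + 2 * (((k + 1 : Nat)) : Int) = (((2 + 2 * k : Nat)) : Int) := by push_cast; ring
        have e4 : (0 : Int) + 2 * ((k : Nat) : Int) + 2 = (((2 * k + 2 : Nat)) : Int) := by push_cast; ring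
        have e3 : (0 : Int) + 2 * ((k : Nat) : Int) = (((2 * k : Nat)) : Int) := by push_cast; ring
        rw [e2, e1, e4, e3, PySem.List.slice_natCast, PySem.List.slice_natCast, hflat]
        have h1 : List.drop (2 + 2 * k) p = [] := List.drop_eq_nil_of_le (by rw [hp]; omega)
        rw [List.drop_append, h1, List.nil_append, hp,
          (by omega : 2 + 2 * k - 2 = 2 * k)]
        congr 1
        omega
      exact (List.map_congr_left step).trans (ih (fun q hq => h q (List.mem_cons_of_mem _ hq)))

lemma chunk_flatten (ps : List (List String)) (h : ∀ p ∈ ps, p.length = 2) :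
    (PySem.List.pyRange 0 (PySem.List.len ps.flatten) 2).foldl
      (fun acc x => acc ++ [PySem.List.slice ps.flatten (some x) (some (x + 2))]) [] = ps := by
  have hlen : ps.flatten.length = 2 * ps.length := by
    induction ps with
    | nil => simp
    | cons p rest ih =>
        simp only [List.flatten_cons, List.length_append, List.length_cons,
          ih (fun q hq => h q (List.mem_cons_of_mem _ hq)), h p List.mem_cons_self]
        ring
  rw [PySem.List.len_eq, hlen]
  push_cast
  rw [PySem.List.pyRange_of_pos 0 (2 * (ps.length : Int)) (by omega : (0:Int) < 2),
    PySem.List.foldl_append_singleton_eq_map]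
  have hcount : (if (0:Int) < 2 * (ps.length : Int) then
      ((2 * (ps.length : Int) - 0 + 2 - 1) / 2).toNat else 0) = ps.length := by
    split <;> omega
  rw [hcount, List.map_map]
  simp only [List.nil_append, Function.comp_def]
  exact map_slice_flatten ps h

-- ===== VERDICT (by name: the statement is the Claim_ definition above) =====
theorem genny_spec : Claim_equal_genny := by
  intro n _ hn
  unfold Spec_genny genny
  rw [gennyLoop_eq]
  rw [PySem.List.pyRange_one_cons (by unfold Pre_genny at hn; omega : (0:Int) < n + 1)]
  simp only [List.map_cons, List.flatten_cons, List.nil_append]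
  have hpair0 : pvPair 0 = ["00", "0p"] := by decide
  rw [hpair0]
  simp only [List.cons_append, List.nil_append]
  rw [PySem.List.remove?_cons_of_ne _ (by decide : ("00":String) ≠ "0p"),
    PySem.List.remove?_cons_self, Option.map_some]
  dsimp only
  rw [PySem.List.remove?_cons_self]
  dsimp only
  rw [chunk_flatten _ (by intro p hp; simp only [List.mem_map] at hp
                          obtain ⟨c, _, rfl⟩ := hp; rfl)]
  simp [genny_alt, pvPair]
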